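-- pv_equiv track=rewrite | github.com/Shaunakm07/BytePairTokeniser | src/tokeniser.py | find_byte_pairs
-- ===== SOURCE A (Python) =====
-- def find_byte_pairs(word_count):
--     word_keys = word_count.keys()
--     byte_pairs = {}
--
--     for k in word_keys:
--         occurences = {}
--         for i in range(len(k) - 1):
--             pairs = (k[i], k[i + 1])
--             count = occurences.get(pairs, 0)
--             count += 1
--             occurences[pairs] = count
--
--         for j in occurences.keys():
--             count = occurences[j]
--             count = count * word_count[k]
--
--             pairs_count = byte_pairs.get(j, 0)
--             pairs_count += count
--             byte_pairs[j] = pairs_count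
--
--     return byte_pairs
-- ===== SOURCE B (Python) =====
-- def find_byte_pairs(word_count):
--     byte_pairs = {}
--     for k, weight in word_count.items():
--         for pair in zip(k, k[1:]):
--             byte_pairs[pair] = byte_pairs.get(pair, 0) + weight
--     return byte_pairs
-- ===== Notes on version B (the rewrite author's own statement) =====
-- stated objective: simpler
-- what changed: Drops the per-word occurrence counter and the multiply-then-merge second phase: a single pass over zip(k, k[1:]) adds the word's weight directly to the global pair table on every occurrence.
import Mathlib
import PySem

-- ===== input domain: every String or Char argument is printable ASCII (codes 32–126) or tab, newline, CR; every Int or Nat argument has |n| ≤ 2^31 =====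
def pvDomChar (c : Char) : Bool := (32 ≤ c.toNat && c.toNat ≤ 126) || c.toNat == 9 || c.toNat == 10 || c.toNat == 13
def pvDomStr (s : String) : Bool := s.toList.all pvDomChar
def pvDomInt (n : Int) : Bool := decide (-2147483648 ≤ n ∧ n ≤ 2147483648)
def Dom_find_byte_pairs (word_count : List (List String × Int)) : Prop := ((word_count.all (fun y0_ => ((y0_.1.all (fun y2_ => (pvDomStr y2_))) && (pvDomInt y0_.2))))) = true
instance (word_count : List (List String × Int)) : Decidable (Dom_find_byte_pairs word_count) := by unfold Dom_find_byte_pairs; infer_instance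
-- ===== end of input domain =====

-- B drops A's per-word occurrence counter and multiply-then-merge phase: one direct weighted
-- accumulation pass over zip(k, k[1:]) (same result; objective: simpler decomposition).

-- ===== PORT A =====
-- literal port of A: per word, build a local occurrence counter over index pairs,
-- then merge it into byte_pairs scaled by word_count[k].
-- (k[i] is always in range here, and k is always a key of word_count, so getD is exact.)
def find_byte_pairs (word_count : List (List String × Int)) : List (String × String × Int) :=
  let wc : PySem.Dict (List String) Int := PySem.Dict.ofList word_count
  let byte_pairs : PySem.Dict (String × String) Int :=
    wc.keys.foldl (fun byte_pairs k =>
      let occurences : PySem.Dict (String × String) Int :=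
        (PySem.List.pyRange 0 ((k.length : Int) - 1) 1).foldl (fun occurences i =>
          let pairs := (PySem.List.pyGetD k i "", PySem.List.pyGetD k (i + 1) "")
          let count := occurences.getD pairs 0 + 1
          occurences.insert pairs count) PySem.Dict.empty
      occurences.keys.foldl (fun byte_pairs j =>
        let count := occurences.getD j 0 * wc.getD k 0
        let pairs_count := byte_pairs.getD j 0 + count
        byte_pairs.insert j pairs_count) byte_pairs) PySem.Dict.empty
  byte_pairs.items.map (fun p => (p.1.1, p.1.2, p.2))   -- dict[(s,s)] -> required right-assoc triple

-- ===== PORT B =====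
-- literal port of Source B: for (k, weight) in items, for pair in zip(k, k[1:]), add weight.
def find_byte_pairs_alt (word_count : List (List String × Int)) : List (String × String × Int) :=
  let byte_pairs : PySem.Dict (String × String) Int :=
    (PySem.Dict.ofList word_count).items.foldl (fun byte_pairs kw =>
      (kw.1.zip (PySem.List.slice kw.1 (some 1) none)).foldl (fun byte_pairs pair =>
        byte_pairs.insert pair (byte_pairs.getD pair 0 + kw.2)) byte_pairs) PySem.Dict.empty
  byte_pairs.items.map (fun p => (p.1.1, p.1.2, p.2))   -- dict[(s,s)] -> required right-assoc triple

-- ===== PRECONDITION & SPEC =====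
def Spec_find_byte_pairs (word_count : List (List String × Int)) (out : List (String × String × Int)) : Prop := out = find_byte_pairs_alt word_count
instance (word_count : List (List String × Int)) (out : List (String × String × Int)) : Decidable (Spec_find_byte_pairs word_count out) := by unfold Spec_find_byte_pairs; infer_instance

-- ===== CLAIM (what is proved, stated in full; the proofs are below) =====
def Claim_equal_find_byte_pairs : Prop := ∀ (word_count : List (List String × Int)), Dom_find_byte_pairs word_count → Spec_find_byte_pairs word_count (find_byte_pairs word_count)

-- ===== LEMMAS AND PROOFS =====

def pvAdd (b : PySem.Dict (String × String) Int) (p : String × String) (δ : Int) :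
    PySem.Dict (String × String) Int := b.insert p (b.getD p 0 + δ)

lemma pv_insert_comm (b : PySem.Dict (String × String) Int) (p q : String × String)
    (X Y : Int) (hne : q ≠ p) (hc : b.contains p = true) :
    (b.insert q X).insert p Y = (b.insert p Y).insert q X := by
  by_cases hq : b.contains q = true
  · have h1 : (b.insert q X).contains p = true := by
      simp [PySem.Dict.contains_insert, hc]
    have h2 : (b.insert p Y).contains q = true := by
      simp [PySem.Dict.contains_insert, hq]
    apply PySem.Dict.ext
    rw [PySem.Dict.items_insert_of_contains _ _ h1, PySem.Dict.items_insert_of_contains _ _ hq,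
        PySem.Dict.items_insert_of_contains _ _ h2, PySem.Dict.items_insert_of_contains _ _ hc,
        List.map_map, List.map_map]
    apply List.map_congr_left
    intro x _
    by_cases hxq : x.1 = q <;> by_cases hxp : x.1 = p <;> simp_all
  · have hq' : b.contains q = false := by simpa using hq
    have h1 : (b.insert q X).contains p = true := by
      simp [PySem.Dict.contains_insert, hc]
    have h2 : (b.insert p Y).contains q = false := by
      simp [PySem.Dict.contains_insert, hq', hne]
    apply PySem.Dict.ext
    rw [PySem.Dict.items_insert_of_contains _ _ h1,
        PySem.Dict.items_insert_of_not_contains _ _ hq',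
        PySem.Dict.items_insert_of_not_contains _ _ h2,
        PySem.Dict.items_insert_of_contains _ _ hc,
        List.map_append]
    simp [hne]

lemma pv_add_step_comm (b : PySem.Dict (String × String) Int) (p q : String × String)
    (ε w : Int) (hne : q ≠ p) (hc : b.contains p = true) :
    pvAdd (pvAdd b q ε) p w = pvAdd (pvAdd b p w) q ε := by
  unfold pvAdd
  rw [PySem.Dict.getD_insert_of_ne _ _ _ hne, PySem.Dict.getD_insert_of_ne _ _ _ (Ne.symm hne)]
  exact pv_insert_comm b p q _ _ hne hc

lemma pv_add_absorb (b : PySem.Dict (String × String) Int) (p : String × String) (δ w : Int) :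
    pvAdd (pvAdd b p δ) p w = pvAdd b p (δ + w) := by
  unfold pvAdd
  rw [PySem.Dict.getD_insert_self, PySem.Dict.insert_insert_self, add_assoc]

lemma pv_fold_comm (f : String × String → Int) (S : List (String × String))
    (p : String × String) (hp : ∀ q ∈ S, q ≠ p) (w : Int) :
    ∀ b : PySem.Dict (String × String) Int, b.contains p = true →
      pvAdd (S.foldl (fun b q => pvAdd b q (f q)) b) p w
        = S.foldl (fun b q => pvAdd b q (f q)) (pvAdd b p w) := by
  induction S with
  | nil => intro b _; rfl
  | cons q S ih =>
    intro b hb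
    simp only [List.foldl_cons]
    rw [ih (fun r hr => hp r (List.mem_cons_of_mem _ hr)) _
          (by simp [pvAdd, PySem.Dict.contains_insert, hb]),
        pv_add_step_comm _ _ _ _ _ (hp q (List.mem_cons_self)) hb]

lemma pv_per_word (w : Int) (ps : List (String × String)) :
    ∀ bp : PySem.Dict (String × String) Int,
      (PySem.Set.ofList ps).foldl (fun bp j => pvAdd bp j ((ps.count j : Int) * w)) bp
        = ps.foldl (fun bp p => pvAdd bp p w) bp := by
  induction ps using List.reverseRecOn with
  | nil => intro bp; rfl
  | append_singleton ps p ih =>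
    intro bp
    rw [List.foldl_concat]
    by_cases hp : p ∈ ps
    · have hset : PySem.Set.ofList (ps ++ [p]) = PySem.Set.ofList ps := by simp [pysem, hp]
      rw [hset, ← ih bp]
      have hmem : p ∈ PySem.Set.ofList ps := (PySem.Set.mem_ofList ps p).mpr hp
      obtain ⟨S₁, S₂, hS⟩ := List.append_of_mem hmem
      have hnd : (S₁ ++ p :: S₂).Nodup := hS ▸ PySem.Set.nodup_ofList ps
      have hp1 : p ∉ S₁ := by
        intro h; exact (List.disjoint_of_nodup_append hnd) h List.mem_cons_self
      have hp2 : p ∉ S₂ := by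
        have := (List.nodup_append.mp hnd).2.1
        simpa using (List.nodup_cons.mp this).1
      rw [hS, List.foldl_append, List.foldl_append, List.foldl_cons, List.foldl_cons]
      -- replace counts of ps++[p] by counts of ps on S₁ and S₂ (their members differ from p)
      have hcnt : ∀ (j : String × String), j ≠ p →
          (((ps ++ [p]).count j : Int) * w) = ((ps.count j : Int) * w) := by
        intro j hj
        simp [List.count_append, Ne.symm hj]
      have hS₁ : ∀ (acc : PySem.Dict (String × String) Int), ∀ j ∈ S₁,
          pvAdd acc j (((ps ++ [p]).count j : Int) * w) = pvAdd acc j ((ps.count j : Int) * w) := by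
        intro acc j hj; rw [hcnt j (fun h => hp1 (h ▸ hj))]
      have hS₂ : ∀ (acc : PySem.Dict (String × String) Int), ∀ j ∈ S₂,
          pvAdd acc j (((ps ++ [p]).count j : Int) * w) = pvAdd acc j ((ps.count j : Int) * w) := by
        intro acc j hj; rw [hcnt j (fun h => hp2 (h ▸ hj))]
      rw [PySem.List.foldl_congr_mem S₁ _ _ _ hS₁, PySem.List.foldl_congr_mem S₂ _ _ _ hS₂]
      set b₁ := S₁.foldl (fun bp j => pvAdd bp j ((ps.count j : Int) * w)) bp with hb₁
      have hcp : ((ps ++ [p]).count p : Int) * w = (ps.count p : Int) * w + w := by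
        simp [List.count_append]; ring
      rw [hcp]
      rw [← pv_add_absorb b₁ p ((ps.count p : Int) * w) w]
      rw [pv_fold_comm _ S₂ p (fun q hq h => hp2 (h ▸ hq)) w _
            (by simp [pvAdd])]
    · have hset : PySem.Set.ofList (ps ++ [p]) = PySem.Set.ofList ps ++ [p] := by
        simp [pysem, hp]
      rw [hset, List.foldl_concat]
      have hS : ∀ (acc : PySem.Dict (String × String) Int), ∀ j ∈ PySem.Set.ofList ps,
          pvAdd acc j (((ps ++ [p]).count j : Int) * w) = pvAdd acc j ((ps.count j : Int) * w) := by
        intro acc j hj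
        have hj' : j ≠ p := fun h => hp (h ▸ (PySem.Set.mem_ofList ps j).mp hj)
        simp [List.count_append, Ne.symm hj']
      rw [PySem.List.foldl_congr_mem _ _ _ _ hS, ih bp]
      have : ((ps ++ [p]).count p : Int) * w = w := by
        simp [List.count_append, List.count_eq_zero.mpr hp]
      rw [this]

lemma pv_zip_tail (k : List String) :
    k.zip k.tail = (List.range (k.length - 1)).map (fun i => (k.getD i "", k.getD (i + 1) "")) := by
  apply List.ext_getElem
  · simp [List.length_zip, List.length_tail]
  · intro i h1 h2
    have hl : i < k.length - 1 := by simpa [List.length_zip, List.length_tail] using h1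
    simp only [List.getElem_zip, List.getElem_tail, List.getElem_map, List.getElem_range]
    rw [List.getD_eq_getElem k "" (by omega), List.getD_eq_getElem k "" (by omega)]

lemma pv_occ_eq (k : List String) :
    ((PySem.List.pyRange 0 ((k.length : Int) - 1) 1).foldl (fun occ i =>
        occ.insert (PySem.List.pyGetD k i "", PySem.List.pyGetD k (i + 1) "")
          (occ.getD (PySem.List.pyGetD k i "", PySem.List.pyGetD k (i + 1) "") 0 + 1))
      PySem.Dict.empty)
    = PySem.Dict.counter (k.zip k.tail) := by
  rw [← PySem.Dict.foldl_insert_getD_add_one_eq_counter, pv_zip_tail, List.foldl_map,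
      PySem.List.pyRange_one]
  have hn : (((k.length : Int) - 1) - 0).toNat = k.length - 1 := by omega
  rw [hn, List.foldl_map]
  apply PySem.List.foldl_congr_mem
  intro acc i _
  rw [show (0 + (i : Int)) = ((i : Nat) : Int) by omega,
      show ((i : Int) + 1) = (((i + 1 : Nat)) : Int) by push_cast; ring, PySem.List.pyGetD_natCast, PySem.List.pyGetD_natCast]
-- B drops A's per-word occurrence counter and multiply-then-merge phase: one direct weighted
-- accumulation pass over zip(k, k[1:]) (same result; objective: simpler decomposition).


lemma pv_main (word_count : List (List String × Int)) :
    find_byte_pairs word_count = find_byte_pairs_alt word_count := by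
  simp only [find_byte_pairs, find_byte_pairs_alt]
  apply congrArg (fun d : PySem.Dict (String × String) Int =>
    d.items.map (fun p => (p.1.1, p.1.2, p.2)))
  rw [PySem.Dict.items_eq_map_keys (PySem.Dict.ofList word_count)
        (PySem.Dict.nodup_keys_ofList _) 0, List.foldl_map]
  apply PySem.List.foldl_congr_mem
  intro bp k _
  rw [pv_occ_eq k, PySem.Dict.keys_counter, PySem.List.slice_from_one]
  have h1 := pv_per_word ((PySem.Dict.ofList word_count).getD k 0) (k.zip k.tail) bp
  simp only [pvAdd] at h1
  have h2 : ∀ (acc : PySem.Dict (String × String) Int), ∀ j ∈ PySem.Set.ofList (k.zip k.tail),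
      acc.insert j (acc.getD j 0 + (PySem.Dict.counter (k.zip k.tail)).getD j 0 *
        (PySem.Dict.ofList word_count).getD k 0)
      = acc.insert j (acc.getD j 0 + ((k.zip k.tail).count j : Int) *
        (PySem.Dict.ofList word_count).getD k 0) := by
    intro acc j _; rw [PySem.Dict.getD_counter]
  rw [PySem.List.foldl_congr_mem _ _ _ _ h2, h1]

-- ===== VERDICT (by name: the statement is the Claim_ definition above) =====
theorem find_byte_pairs_spec : Claim_equal_find_byte_pairs := by
  intro word_count _
  exact pv_main word_count
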